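-- pv_equiv track=rewrite | github.com/hjlim7831/algorithm | 프로그래머스/lv2/87390. n＾2 배열 자르기/n＾2 배열 자르기.py | solution
-- ===== SOURCE A (Python) =====
-- def solution(n, left, right):
--     answer = []
--     idx = left
--     r, c = idx % n, idx // n
--     while idx <= right:
--         num = max(r, c) + 1
--         answer.append(num)
--         idx += 1
--         r = (r + 1) % n
--         if not r:
--             c += 1
--
--     return answer
-- ===== SOURCE B (Python) =====
-- def solution(n, left, right):
--     answer = []
--     for q in range(left // n, right // n + 1):
--         lo = left - q * n if q == left // n else 0
--         hi = right - q * n if q == right // n else n - 1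
--         answer.extend([q + 1] * (min(hi, q - 1) - lo + 1))
--         answer.extend(range(max(lo, q) + 1, hi + 2))
--     return answer
-- ===== Notes on version B (the rewrite author's own statement) =====
-- stated objective: alternative
-- what changed: B replaces A's element-by-element flat-index walk with mutable (r,c) modular state by a per-row block construction: for each row spanned by [left,right] it appends a constant block [row+1]*k for the columns below the diagonal and a consecutive range for the rest.
-- outside the precondition, e.g. on solution(-3, 0, 2): A returns [1, 1, 1], B returns []; on solution(0, 0, 2): A raises ZeroDivisionError, B raises ZeroDivisionError
import Mathlib
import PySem

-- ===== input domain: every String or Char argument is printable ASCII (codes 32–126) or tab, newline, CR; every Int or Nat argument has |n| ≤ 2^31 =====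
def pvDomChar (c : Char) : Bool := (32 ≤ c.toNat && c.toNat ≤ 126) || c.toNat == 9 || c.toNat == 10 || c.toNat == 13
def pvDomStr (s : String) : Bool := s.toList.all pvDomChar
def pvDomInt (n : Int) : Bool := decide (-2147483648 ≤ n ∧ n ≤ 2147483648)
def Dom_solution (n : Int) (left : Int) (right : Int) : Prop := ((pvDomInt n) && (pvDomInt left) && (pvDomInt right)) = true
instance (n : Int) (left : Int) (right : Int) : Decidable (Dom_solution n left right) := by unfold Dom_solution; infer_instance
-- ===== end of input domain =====

-- B rebuilds the answer row by row (constant block + consecutive range per row) instead of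
-- A's single flat-index walk; objective: alternative decomposition, same asymptotic cost.

-- ===== PORT A =====
-- while loop of A: state (idx, r, c, answer); fuel = number of remaining iterations
def solutionLoop (n : Int) (right : Int) : Nat → Int → Int → Int → List Int → List Int
  | 0, _, _, _, answer => answer
  | fuel + 1, idx, r, c, answer =>
    if idx ≤ right then
      let num := max r c + 1
      let r' := PySem.Int.mod (r + 1) n
      let c' := if r' = 0 then c + 1 else c
      solutionLoop n right fuel (idx + 1) r' c' (answer ++ [num])
    else answer

def solution (n : Int) (left : Int) (right : Int) : List Int :=
  solutionLoop n right (right + 1 - left).toNat left (PySem.Int.mod left n) (PySem.Int.floordiv left n) []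

-- ===== PORT B =====
def solution_alt (n : Int) (left : Int) (right : Int) : List Int :=
  (PySem.List.pyRange (PySem.Int.floordiv left n) (PySem.Int.floordiv right n + 1) 1).foldl
    (fun answer q =>
      let lo := if q = PySem.Int.floordiv left n then left - q * n else 0
      let hi := if q = PySem.Int.floordiv right n then right - q * n else n - 1
      (answer ++ List.replicate (min hi (q - 1) - lo + 1).toNat (q + 1))
        ++ PySem.List.pyRange (max lo q + 1) (hi + 2) 1)
    []

-- ===== PRECONDITION & SPEC =====
-- Pre_ restricts to the task's natural domain n ≥ 1 (n is the side of the n×n array):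
-- A raises ZeroDivisionError for n = 0, and for n < 0 A's modular index walk returns
-- values with no n×n-array meaning, outside the task's natural domain.
def Pre_solution (n : Int) (left : Int) (right : Int) : Prop := 1 ≤ n
instance (n : Int) (left : Int) (right : Int) : Decidable (Pre_solution n left right) := by unfold Pre_solution; infer_instance
def pvWitness_solution : Int × Int × Int := (3, 2, 5)
def Spec_solution (n : Int) (left : Int) (right : Int) (out : List Int) : Prop := out = solution_alt n left right
instance (n : Int) (left : Int) (right : Int) (out : List Int) : Decidable (Spec_solution n left right out) := by unfold Spec_solution; infer_instance

-- ===== CLAIM (what is proved, stated in full; the proofs are below) =====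
def Claim_equal_solution : Prop := ∀ (n : Int) (left : Int) (right : Int), Dom_solution n left right → Pre_solution n left right → Spec_solution n left right (solution n left right)

-- ===== LEMMAS AND PROOFS =====

-- the value at flat index i of the n×n array
def pvF (n : Int) (i : Int) : Int := max (PySem.Int.mod i n) (PySem.Int.floordiv i n) + 1

theorem pvMod_div_of_block (n q r : Int) (hn : 0 < n) (h0 : 0 ≤ r) (h1 : r < n) :
    PySem.Int.floordiv (q * n + r) n = q ∧ PySem.Int.mod (q * n + r) n = r := by
  have hd : PySem.Int.floordiv (q * n + r) n = q := by
    rw [PySem.Int.floordiv_eq_iff_of_pos hn]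
    constructor <;> nlinarith
  refine ⟨hd, ?_⟩
  have := PySem.Int.floordiv_mul_add_mod (q * n + r) n
  rw [hd] at this
  omega

theorem pvStep_mod (n idx : Int) (hn : 0 < n) :
    PySem.Int.mod (PySem.Int.mod idx n + 1) n = PySem.Int.mod (idx + 1) n := by
  rw [PySem.Int.mod_eq_emod_of_pos hn, PySem.Int.mod_eq_emod_of_pos hn,
    PySem.Int.mod_eq_emod_of_pos hn]
  conv_rhs => rw [Int.add_emod]
  conv_lhs => rw [Int.add_emod]
  rw [Int.emod_emod_of_dvd idx dvd_rfl]

theorem pvStep_div (n idx : Int) (hn : 0 < n) :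
    PySem.Int.floordiv (idx + 1) n
      = if PySem.Int.mod (idx + 1) n = 0 then PySem.Int.floordiv idx n + 1
        else PySem.Int.floordiv idx n := by
  have hb := PySem.Int.floordiv_mul_add_mod idx n
  have h1 := PySem.Int.mod_nonneg (a := idx) (b := n) hn
  have h2 := PySem.Int.mod_lt (a := idx) (b := n) hn
  by_cases hc : PySem.Int.mod idx n + 1 = n
  · obtain ⟨hd, hm⟩ := pvMod_div_of_block n (PySem.Int.floordiv idx n + 1) 0 hn (le_refl 0) hn
    rw [show idx + 1 = (PySem.Int.floordiv idx n + 1) * n + 0 from by nlinarith, hd, hm]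
    simp
  · obtain ⟨hd, hm⟩ := pvMod_div_of_block n (PySem.Int.floordiv idx n) (PySem.Int.mod idx n + 1) hn (by omega) (by omega)
    rw [show idx + 1 = PySem.Int.floordiv idx n * n + (PySem.Int.mod idx n + 1) from by linarith, hd, hm]
    rw [if_neg (by omega)]

theorem pvLoopA (n right : Int) (hn : 0 < n) :
    ∀ (fuel : Nat) (idx : Int) (acc : List Int), fuel = (right + 1 - idx).toNat →
      solutionLoop n right fuel idx (PySem.Int.mod idx n) (PySem.Int.floordiv idx n) acc
        = acc ++ (PySem.List.pyRange idx (right + 1) 1).map (pvF n) := by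
  intro fuel
  induction fuel with
  | zero =>
    intro idx acc h
    rw [PySem.List.pyRange_one_eq_nil (by omega)]
    simp [solutionLoop]
  | succ f ih =>
    intro idx acc h
    have hle : idx ≤ right := by omega
    rw [PySem.List.pyRange_one_cons (by omega), List.map_cons]
    simp only [solutionLoop, if_pos hle]
    rw [pvStep_mod n idx hn, ← pvStep_div n idx hn,
      ih (idx + 1) (acc ++ [max (PySem.Int.mod idx n) (PySem.Int.floordiv idx n) + 1]) (by omega)]
    simp [pvF]

-- per-row chunk appended by B for row q
def pvChunk (n left right : Int) (q : Int) : List Int :=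
  let lo := if q = PySem.Int.floordiv left n then left - q * n else 0
  let hi := if q = PySem.Int.floordiv right n then right - q * n else n - 1
  List.replicate (min hi (q - 1) - lo + 1).toNat (q + 1) ++ PySem.List.pyRange (max lo q + 1) (hi + 2) 1

theorem pvRowLemma (n q : Int) (hn : 0 < n) :
    ∀ (k : Nat) (lo : Int) (hi : Int), k = (hi + 1 - lo).toNat → 0 ≤ lo → hi ≤ n - 1 →
      (PySem.List.pyRange (q * n + lo) (q * n + hi + 1) 1).map (pvF n)
        = List.replicate (min hi (q - 1) - lo + 1).toNat (q + 1)
          ++ PySem.List.pyRange (max lo q + 1) (hi + 2) 1 := by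
  intro k
  induction k with
  | zero =>
    intro lo hi hk h0 h1
    rw [PySem.List.pyRange_one_eq_nil (by omega),
      PySem.List.pyRange_one_eq_nil (by omega),
      show (min hi (q - 1) - lo + 1).toNat = 0 from by omega]
    simp
  | succ f ih =>
    intro lo hi hk h0 h1
    have hlo : lo ≤ hi := by omega
    rw [PySem.List.pyRange_one_cons (by omega), List.map_cons]
    obtain ⟨hd, hm⟩ := pvMod_div_of_block n q lo hn h0 (by omega)
    have hf : pvF n (q * n + lo) = max lo q + 1 := by simp [pvF, hd, hm]
    have hih := ih (lo + 1) hi (by omega) (by omega) h1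
    rw [show q * n + lo + 1 = q * n + (lo + 1) from by ring]
    by_cases hcase : lo < q
    · rw [hf, hih, show max lo q = q from by omega, show max (lo + 1) q = q from by omega,
        show (min hi (q - 1) - lo + 1).toNat = (min hi (q - 1) - (lo + 1) + 1).toNat + 1 from by omega,
        List.replicate_succ]
      simp
    · rw [hf, hih, show max lo q = lo from by omega, show max (lo + 1) q = lo + 1 from by omega,
        show (min hi (q - 1) - lo + 1).toNat = 0 from by omega,
        show (min hi (q - 1) - (lo + 1) + 1).toNat = 0 from by omega]
      simp only [List.replicate_zero, List.nil_append]
      rw [PySem.List.pyRange_one_cons (show lo + 1 < hi + 2 from by omega)]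

theorem pvRowsLemma (n right : Int) (hn : 0 < n) :
    ∀ (k : Nat) (q left : Int), k = (PySem.Int.floordiv right n + 1 - q).toNat →
      q * n ≤ left → left < (q + 1) * n →
      (PySem.List.pyRange q (PySem.Int.floordiv right n + 1) 1).flatMap (pvChunk n left right)
        = (PySem.List.pyRange left (right + 1) 1).map (pvF n) := by
  intro k
  induction k with
  | zero =>
    intro q left hk hql hqr
    have hlt : right < q * n := by
      have := (PySem.Int.floordiv_lt_iff_lt_mul (a := right) (b := n) (q := q) hn).mp (by omega)
      exact this
    rw [PySem.List.pyRange_one_eq_nil (by omega),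
      PySem.List.pyRange_one_eq_nil (by omega)]
    simp
  | succ f ih =>
    intro q left hk hql hqr
    have hqb : q ≤ PySem.Int.floordiv right n := by omega
    have hfl : PySem.Int.floordiv left n = q := (PySem.Int.floordiv_eq_iff_of_pos hn).mpr ⟨hql, hqr⟩
    have hrb := (PySem.Int.floordiv_eq_iff_of_pos hn).mp (rfl : PySem.Int.floordiv right n = PySem.Int.floordiv right n)
    rw [PySem.List.pyRange_one_cons (by omega), List.flatMap_cons]
    by_cases hqend : q = PySem.Int.floordiv right n
    · have hrow := pvRowLemma n q hn ((right - q * n) + 1 - (left - q * n)).toNat (left - q * n) (right - q * n) rfl (by omega)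
        (by have h2 := hrb.2; rw [← hqend] at h2; have hexp : (q + 1) * n = q * n + n := by ring
            omega)
      rw [show q * n + (left - q * n) = left from by ring,
        show q * n + (right - q * n) + 1 = right + 1 from by ring] at hrow
      rw [PySem.List.pyRange_one_eq_nil (by omega), List.flatMap_nil, List.append_nil]
      rw [show pvChunk n left right q
          = List.replicate (min (right - q * n) (q - 1) - (left - q * n) + 1).toNat (q + 1)
            ++ PySem.List.pyRange (max (left - q * n) q + 1) ((right - q * n) + 2) 1 from by
        simp only [pvChunk, if_pos hfl.symm, if_pos hqend]]
      rw [← hrow]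
    · have hqlt : q < PySem.Int.floordiv right n := lt_of_le_of_ne hqb hqend
      have hrow := pvRowLemma n q hn ((n - 1) + 1 - (left - q * n)).toNat (left - q * n) (n - 1) rfl (by omega) (by omega)
      rw [show q * n + (left - q * n) = left from by ring,
        show q * n + (n - 1) + 1 = (q + 1) * n from by ring] at hrow
      have hfl' : PySem.Int.floordiv ((q + 1) * n) n = q + 1 :=
        (PySem.Int.floordiv_eq_iff_of_pos hn).mpr ⟨le_refl _, by nlinarith⟩
      have hcong : ∀ x ∈ PySem.List.pyRange (q + 1) (PySem.Int.floordiv right n + 1) 1,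
          pvChunk n left right x = pvChunk n ((q + 1) * n) right x := by
        intro x hx
        rw [PySem.List.mem_pyRange_one] at hx
        have hx1 : ¬ x = PySem.Int.floordiv left n := by omega
        by_cases hx2 : x = q + 1
        · subst hx2
          have hne : ¬ (q + 1 = PySem.Int.floordiv left n) := by omega
          simp only [pvChunk, hfl', if_neg hne]
          rw [show (q + 1) * n - (q + 1) * n = 0 from by ring]
          simp
        · simp only [pvChunk, if_neg hx1, hfl', if_neg hx2]
      rw [List.flatMap_congr hcong,
        ih (q + 1) ((q + 1) * n) (by omega) (le_refl _) (by nlinarith)]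
      rw [show pvChunk n left right q
          = List.replicate (min (n - 1) (q - 1) - (left - q * n) + 1).toNat (q + 1)
            ++ PySem.List.pyRange (max (left - q * n) q + 1) ((n - 1) + 2) 1 from by
        simp only [pvChunk, if_pos hfl.symm, if_neg hqend]]
      rw [← hrow, ← List.map_append,
        ← PySem.List.pyRange_one_append left ((q + 1) * n) (right + 1) (by omega)
          (by nlinarith [hrb.1, Int.mul_le_mul_of_nonneg_right (show q + 1 ≤ PySem.Int.floordiv right n from by omega) (show (0:Int) ≤ n from by omega)])]

theorem pvAlt_eq_flatMap (n left right : Int) :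
    solution_alt n left right
      = (PySem.List.pyRange (PySem.Int.floordiv left n) (PySem.Int.floordiv right n + 1) 1).flatMap (pvChunk n left right) := by
  unfold solution_alt
  rw [show (fun (answer : List Int) (q : Int) =>
        let lo := if q = PySem.Int.floordiv left n then left - q * n else 0
        let hi := if q = PySem.Int.floordiv right n then right - q * n else n - 1
        (answer ++ List.replicate (min hi (q - 1) - lo + 1).toNat (q + 1))
          ++ PySem.List.pyRange (max lo q + 1) (hi + 2) 1)
      = (fun (answer : List Int) (q : Int) => answer ++ pvChunk n left right q) from by
    funext answer q
    simp [pvChunk, List.append_assoc]]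
  rw [PySem.List.foldl_append_eq_flatMap]
  simp

-- ===== VERDICT (by name: the statement is the Claim_ definition above) =====
theorem solution_spec : Claim_equal_solution := by
  intro n left right _ hn
  unfold Spec_solution solution
  have h0 : (0:Int) < n := hn
  rw [pvLoopA n right h0 _ left [] rfl, pvAlt_eq_flatMap, List.nil_append]
  have hq : PySem.Int.floordiv left n * n ≤ left ∧ left < (PySem.Int.floordiv left n + 1) * n := by
    have := PySem.Int.floordiv_mul_add_mod left n
    have h1 := PySem.Int.mod_nonneg (a := left) (b := n) h0
    have h2 := PySem.Int.mod_lt (a := left) (b := n) h0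
    constructor <;> nlinarith
  rw [pvRowsLemma n right h0 _ _ left rfl hq.1 hq.2]
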